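-- pv_equiv track=rewrite | github.com/Ahmad-Shafique/Python-Problem-Solving | CSV toJSON converter/CSVToJSON.py | ReturnStringBefore
-- ===== SOURCE A (Python) =====
-- def ReturnStringBefore(string,parameter):
-- 	nString = ""
-- 	for i in string:
-- 		if(i!=parameter):
-- 			nString +=  i
-- 		else:
-- 			break
-- 	return nString
-- ===== SOURCE B (Python) =====
-- def ReturnStringBefore(string, parameter):
--     idx = next((k for k, c in enumerate(string) if c == parameter), len(string))
--     return string[:idx]
-- ===== Notes on version B (the rewrite author's own statement) =====
-- stated objective: simpler
-- what changed: Replaces A's accumulate-and-break loop with a two-phase 'find first boundary index, then slice' decomposition (no string accumulation).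
import Mathlib
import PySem

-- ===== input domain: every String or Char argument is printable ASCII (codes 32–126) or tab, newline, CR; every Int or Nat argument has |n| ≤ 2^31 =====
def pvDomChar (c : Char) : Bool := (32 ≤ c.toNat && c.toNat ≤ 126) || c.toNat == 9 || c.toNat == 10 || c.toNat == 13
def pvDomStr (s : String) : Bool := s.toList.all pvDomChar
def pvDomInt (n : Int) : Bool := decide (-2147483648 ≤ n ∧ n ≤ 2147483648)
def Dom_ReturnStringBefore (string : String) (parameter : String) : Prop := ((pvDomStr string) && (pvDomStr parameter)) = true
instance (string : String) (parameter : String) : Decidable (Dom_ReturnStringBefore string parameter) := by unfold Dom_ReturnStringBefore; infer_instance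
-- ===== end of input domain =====

-- B replaces A's accumulate-and-break loop by a two-phase "find first boundary index, then slice" decomposition (objective: simpler); same O(n) cost.


-- ===== PORT A =====
-- A: loop over the characters, appending each char (as a 1-char string, as Python's iteration yields)
-- until one equals `parameter`, then stop.
def goA (l : List Char) (parameter : String) (acc : List Char) : List Char :=
  match l with
  | [] => acc
  | c :: rest =>
      if String.mk [c] ≠ parameter then goA rest parameter (acc ++ [c])
      else acc

def ReturnStringBefore (string : String) (parameter : String) : String :=
  String.mk (goA string.toList parameter [])

-- ===== PORT B =====
-- B: find the cutoff index first (first position whose char equals `parameter`,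
-- default the full length), then slice up to it.
def ReturnStringBefore_alt (string : String) (parameter : String) : String :=
  let l := string.toList
  let idx := (l.findIdx? (fun c => String.mk [c] == parameter)).getD l.length
  String.mk (l.take idx)

-- ===== PRECONDITION & SPEC =====
def Spec_ReturnStringBefore (string : String) (parameter : String) (out : String) : Prop := out = ReturnStringBefore_alt string parameter
instance (string : String) (parameter : String) (out : String) : Decidable (Spec_ReturnStringBefore string parameter out) := by unfold Spec_ReturnStringBefore; infer_instance

-- ===== CLAIM (what is proved, stated in full; the proofs are below) =====
def Claim_equal_ReturnStringBefore : Prop := ∀ (string : String) (parameter : String), Dom_ReturnStringBefore string parameter → Spec_ReturnStringBefore string parameter (ReturnStringBefore string parameter)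

-- ===== LEMMAS AND PROOFS =====

-- ===== VERDICT (by name: the statement is the Claim_ definition above) =====
lemma goA_eq (parameter : String) (l : List Char) (acc : List Char) :
    goA l parameter acc =
      acc ++ l.take ((l.findIdx? (fun c => String.mk [c] == parameter)).getD l.length) := by
  induction l generalizing acc with
  | nil => simp [goA]
  | cons c rest ih =>
      simp only [goA, List.findIdx?_cons]
      by_cases h : String.mk [c] = parameter
      · simp [h]
      · have hb : (String.mk [c] == parameter) = false := by
          simp [h]
        simp only [h, hb, ne_eq, not_false_eq_true, if_true, cond_false, ih]
        cases hf : rest.findIdx? (fun c => String.mk [c] == parameter) with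
        | none => simp [List.take_succ_cons]
        | some n => simp [List.take_succ_cons]

theorem ReturnStringBefore_spec : Claim_equal_ReturnStringBefore := by
  intro s p _
  unfold Spec_ReturnStringBefore ReturnStringBefore ReturnStringBefore_alt
  simp [goA_eq]
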